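-- pv_equiv track=rewrite | github.com/Yeop-Dong/CodingTest_Study | 프로그래머스/2/250136. ［PCCP 기출문제］ 2번 ／ 석유 시추/［PCCP 기출문제］ 2번 ／ 석유 시추.py | solution
-- ===== SOURCE A (Python) =====
-- def solution(land):
--     n, m = len(land), len(land[0])
--     pipe = [ [] for i in range(m) ]
--     directions = [ (0, 1), (1, 0), (-1, 0), (0, -1) ]
--
--     def bfs(land, start):
--         y, x = start
--         connected = [x]
--         quantity = 1
--         q = [(y, x)]
--         land[y][x] = 0
--         while q:
--             y, x = q.pop(0)
--             for dy, dx in directions: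
--                 ny, nx = y + dy, x + dx
--                 if 0 <= ny < n and 0 <= nx < m and land[ny][nx] == 1:
--                     q.append((ny, nx))
--                     quantity += 1
--                     land[ny][nx] = 0
--                     if nx not in connected:
--                         connected.append(nx)
--         for c in connected:
--             pipe[c].append(quantity)
--
--     for i, row in enumerate(land):
--         for j, item in enumerate(row):
--             if item == 1:
--                 bfs(land, (i, j))
--
--     return sum(max(pipe, key=sum))
-- ===== SOURCE B (Python) =====
-- # B: connected-component labeling (head-pointer BFS into a label grid + size table),
-- # then a separate column-oriented pass summing distinct component sizes per column.
-- # Unlike A, B does not mutate `land`; equivalence is about the return value.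
-- def solution(land):
--     n, m = len(land), len(land[0])
--     label = [[-1] * m for _ in range(n)]
--     sizes = {}
--     cid = 0
--     for i in range(n):
--         for j in range(m):
--             if land[i][j] == 1 and label[i][j] == -1:
--                 q = [(i, j)]
--                 label[i][j] = cid
--                 head = 0
--                 while head < len(q):
--                     y, x = q[head]
--                     head += 1
--                     for dy, dx in ((0, 1), (1, 0), (-1, 0), (0, -1)):
--                         ny, nx = y + dy, x + dx
--                         if 0 <= ny < n and 0 <= nx < m and land[ny][nx] == 1 and label[ny][nx] == -1:
--                             label[ny][nx] = cid
--                             q.append((ny, nx))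
--                 sizes[cid] = len(q)
--                 cid += 1
--     best = 0
--     for x in range(m):
--         seen = set()
--         total = 0
--         for y in range(n):
--             c = label[y][x]
--             if c != -1 and c not in seen:
--                 seen.add(c)
--                 total += sizes[c]
--         best = max(best, total)
--     return best
-- ===== Notes on version B (the rewrite author's own statement) =====
-- stated objective: alternative
-- what changed: A appends the component size into per-column pipe lists during a pop(0)-queue BFS that zeroes the land grid and finally takes sum(max(pipe, key=sum)); B instead labels components into a separate label grid with a head-pointer BFS and a size table, then computes each column's total in a second column-oriented scan over distinct labels, returning the running maximum (B does not mutate land).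
-- outside the precondition, e.g. on solution([[0, 0], [0]]): A returns 0, B raises IndexError; on solution([]): A raises IndexError, B raises IndexError; on solution([[], []]): A raises ValueError, B returns 0
import Mathlib
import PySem

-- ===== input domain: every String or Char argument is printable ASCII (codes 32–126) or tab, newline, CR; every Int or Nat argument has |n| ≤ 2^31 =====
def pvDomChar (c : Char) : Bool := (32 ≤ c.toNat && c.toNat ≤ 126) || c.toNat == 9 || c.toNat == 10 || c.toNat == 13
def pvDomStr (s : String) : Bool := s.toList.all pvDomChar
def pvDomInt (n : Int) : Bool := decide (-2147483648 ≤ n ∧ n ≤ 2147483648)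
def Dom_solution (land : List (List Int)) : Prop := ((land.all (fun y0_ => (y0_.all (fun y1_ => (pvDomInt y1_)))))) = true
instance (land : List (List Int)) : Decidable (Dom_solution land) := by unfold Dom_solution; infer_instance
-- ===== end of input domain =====

-- B replaces A's BFS-with-pop(0)-and-per-column-append accounting by connected-component
-- labeling into a label grid plus a size table, then a separate column scan; A mutates
-- `land` in place while B does not — the equivalence proved here is about the return value.

-- Shared grid accessors (every use is guarded by 0 ≤ y < n ∧ 0 ≤ x < m, so the
-- getD/set forms are exact for the Python indexings they transliterate).
def gGet (g : List (List Int)) (y x : Int) : Int := (g.getD y.toNat []).getD x.toNat 0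
def gSet (g : List (List Int)) (y x v : Int) : List (List Int) :=
  g.set y.toNat ((g.getD y.toNat []).set x.toNat v)

-- ===== PORT A =====
def pvDirsA : List (Int × Int) := [(0, 1), (1, 0), (-1, 0), (0, -1)]

-- body of A's `for dy, dx in directions` over one dequeued cell
def bfsStepA (n m y x : Int)
    (st : List (List Int) × List (Int × Int) × List Int × Int) :
    List (List Int) × List (Int × Int) × List Int × Int :=
  pvDirsA.foldl (fun st d =>
    match st with
    | (g, q, conn, qty) =>
      let ny := y + d.1
      let nx := x + d.2
      if 0 ≤ ny ∧ ny < n ∧ 0 ≤ nx ∧ nx < m ∧ gGet g ny nx = 1 then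
        (gSet g ny nx 0, q ++ [(ny, nx)], (if nx ∈ conn then conn else conn ++ [nx]), qty + 1)
      else (g, q, conn, qty)) st

-- A's `while q:` loop (fuel ≥ number of dequeues; n*m+1 always suffices since every
-- enqueued cell is a distinct 1-cell that is zeroed on enqueue)
def bfsLoopA (n m : Int) :
    Nat → List (List Int) × List (Int × Int) × List Int × Int →
    List (List Int) × List Int × Int
  | 0, (g, _, conn, qty) => (g, conn, qty)
  | fuel + 1, (g, q, conn, qty) =>
    match q with
    | [] => (g, conn, qty)
    | (y, x) :: rest => bfsLoopA n m fuel (bfsStepA n m y x (g, rest, conn, qty))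

def bfsA (n m : Int) (g : List (List Int)) (i j : Int) :
    List (List Int) × List Int × Int :=
  bfsLoopA n m (n.toNat * m.toNat + 1) (gSet g i j 0, [(i, j)], [j], 1)

-- A's outer double loop (`for i, row in enumerate(land): for j, item in enumerate(row)`;
-- index ranges are exact under Pre_: the grid stays rectangular n × m throughout)
def outerA (n m : Int) (st0 : List (List Int) × List (List Int)) :
    List (List Int) × List (List Int) :=
  (PySem.List.pyRange 0 n 1).foldl (fun st i =>
    (PySem.List.pyRange 0 m 1).foldl (fun st j =>
      if gGet st.1 i j = 1 then
        match bfsA n m st.1 i j with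
        | (g', conn, qty) =>
          (g', conn.foldl (fun p c => p.set c.toNat ((p.getD c.toNat []) ++ [qty])) st.2)
      else st) st) st0

def solution (land : List (List Int)) : Int :=
  let n : Int := land.length
  let m : Int := (land.headD []).length
  let res := outerA n m (land, List.replicate m.toNat [])
  match PySem.List.max? res.2 (fun l => l.sum) with
  | some l => l.sum
  | none => 0   -- unreachable under Pre_ (m ≥ 1, so pipe is nonempty)

-- ===== PORT B =====
def pvDirsB : List (Int × Int) := [(0, 1), (1, 0), (-1, 0), (0, -1)]

-- body of B's direction loop over one visited cell
def fillStepB (land : List (List Int)) (n m cid y x : Int)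
    (st : List (List Int) × List (Int × Int) × Int) :
    List (List Int) × List (Int × Int) × Int :=
  pvDirsB.foldl (fun st d =>
    match st with
    | (lab, todo, qlen) =>
      let ny := y + d.1
      let nx := x + d.2
      if 0 ≤ ny ∧ ny < n ∧ 0 ≤ nx ∧ nx < m ∧ gGet land ny nx = 1 ∧ gGet lab ny nx = -1 then
        (gSet lab ny nx cid, todo ++ [(ny, nx)], qlen + 1)
      else (lab, todo, qlen)) st

-- B's `while head < len(q)` loop: todo = q[head:], qlen = len(q)
def fillLoopB (land : List (List Int)) (n m cid : Int) :
    Nat → List (List Int) × List (Int × Int) × Int → List (List Int) × Int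
  | 0, (lab, _, qlen) => (lab, qlen)
  | fuel + 1, (lab, todo, qlen) =>
    match todo with
    | [] => (lab, qlen)
    | (y, x) :: rest => fillLoopB land n m cid fuel (fillStepB land n m cid y x (lab, rest, qlen))

-- labeling pass: returns (label grid, sizes dict, next component id)
def labelB (land : List (List Int)) (n m : Int) :
    List (List Int) × PySem.Dict Int Int × Int :=
  (PySem.List.pyRange 0 n 1).foldl (fun st i =>
    (PySem.List.pyRange 0 m 1).foldl (fun st j =>
      match st with
      | (lab, sizes, cid) =>
        if gGet land i j = 1 ∧ gGet lab i j = -1 then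
          match fillLoopB land n m cid (n.toNat * m.toNat + 1) (gSet lab i j cid, [(i, j)], 1) with
          | (lab', qlen) => (lab', sizes.insert cid qlen, cid + 1)
        else (lab, sizes, cid)) st)
    (List.replicate n.toNat (List.replicate m.toNat (-1)), PySem.Dict.empty, 0)

-- B's inner column scan (`sizes[c]` is exact as getD: every label ≠ -1 is a dict key)
def colScanB (lab : List (List Int)) (sizes : PySem.Dict Int Int) (n x : Int) : Int :=
  ((PySem.List.pyRange 0 n 1).foldl (fun st y =>
    let c := gGet lab y x
    if c ≠ -1 ∧ c ∉ st.1 then (PySem.Set.add st.1 c, st.2 + sizes.getD c 0) else st)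
    ((PySem.Set.empty : PySem.Set Int), (0 : Int))).2

def solution_alt (land : List (List Int)) : Int :=
  let n : Int := land.length
  let m : Int := (land.headD []).length
  match labelB land n m with
  | (lab, sizes, _) =>
    (PySem.List.pyRange 0 m 1).foldl (fun best x => max best (colScanB lab sizes n x)) 0

-- ===== PRECONDITION & SPEC =====
-- Pre_ excludes inputs where A raises: empty land (IndexError on land[0]), width-0 rows
-- (ValueError from max([])), and ragged grids (IndexError reachable in bfs/pipe).
def Pre_solution (land : List (List Int)) : Prop :=
  land ≠ [] ∧ (land.headD []).length ≠ 0 ∧ ∀ row ∈ land, row.length = (land.headD []).length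
instance (land : List (List Int)) : Decidable (Pre_solution land) := by
  unfold Pre_solution; infer_instance

def pvWitness_solution : List (List Int) := [[0, 1], [1, 1]]

def Spec_solution (land : List (List Int)) (out : Int) : Prop := out = solution_alt land
instance (land : List (List Int)) (out : Int) : Decidable (Spec_solution land out) := by
  unfold Spec_solution; infer_instance

-- ===== CLAIM (what is proved, stated in full; the proofs are below) =====
def Claim_equal_solution : Prop :=
  ∀ (land : List (List Int)), Dom_solution land → Pre_solution land →
    Spec_solution land (solution land)

-- ===== LEMMAS AND PROOFS =====

def InR (n m y x : Int) : Prop := 0 ≤ y ∧ y < n ∧ 0 ≤ x ∧ x < m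

def Dims (g : List (List Int)) (n m : Int) : Prop :=
  g.length = n.toNat ∧ ∀ row ∈ g, row.length = m.toNat

-- the visited-cell relation between A's zeroed grid and B's label grid
def VRel (land g lab : List (List Int)) (n m : Int) : Prop :=
  ∀ y x, InR n m y x → (gGet g y x = 1 ↔ (gGet land y x = 1 ∧ gGet lab y x = -1))

-- conn lists exactly the columns labelled cid
def ConnIff (lab : List (List Int)) (n m cid : Int) (conn : List Int) : Prop :=
  ∀ x, x ∈ conn ↔ ∃ y, InR n m y x ∧ gGet lab y x = cid

-- during one component, the label grid only gains cid on previously unlabelled cells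
def LabExt (lab0 lab : List (List Int)) (n m cid : Int) : Prop :=
  ∀ y x, InR n m y x → gGet lab y x = gGet lab0 y x ∨ (gGet lab y x = cid ∧ gGet lab0 y x = -1)

lemma gGet_gSet_self {g : List (List Int)} {n m y x : Int} (v : Int)
    (hd : Dims g n m) (h : InR n m y x) : gGet (gSet g y x v) y x = v := by
  obtain ⟨hlen, hrow⟩ := hd
  obtain ⟨hy0, hyn, hx0, hxm⟩ := h
  have hy : y.toNat < g.length := by omega
  have hget : g.getD y.toNat [] = g[y.toNat] := by
    rw [List.getD_eq_getElem?_getD, List.getElem?_eq_getElem hy]; rfl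
  have hxr : x.toNat < g[y.toNat].length := by
    have := hrow _ (List.getElem_mem hy)
    omega
  simp [gGet, gSet, List.getD_eq_getElem?_getD, hy, hxr]

lemma gGet_gSet_ne {g : List (List Int)} {y x : Int} (v : Int) {y' x' : Int}
    (hy : 0 ≤ y) (hx : 0 ≤ x) (hy' : 0 ≤ y') (hx' : 0 ≤ x')
    (hne : ¬(y' = y ∧ x' = x)) : gGet (gSet g y x v) y' x' = gGet g y' x' := by
  by_cases hyy : y' = y
  · subst hyy
    have hxx : x.toNat ≠ x'.toNat := by omega
    by_cases hyl : y'.toNat < g.length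
    · simp [gGet, gSet, List.getD_eq_getElem?_getD, hyl, hxx]
    · rw [gSet, List.set_eq_of_length_le (by omega)]
  · have h2 : y.toNat ≠ y'.toNat := by omega
    simp [gGet, gSet, List.getD_eq_getElem?_getD, h2]

lemma dims_gSet {g : List (List Int)} {n m y x : Int} (v : Int)
    (hd : Dims g n m) (h : InR n m y x) : Dims (gSet g y x v) n m := by
  obtain ⟨hlen, hrow⟩ := hd
  refine ⟨by simpa [gSet] using hlen, ?_⟩
  intro row hr
  rcases List.mem_or_eq_of_mem_set hr with h1 | h1
  · exact hrow _ h1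
  · subst h1
    rw [List.length_set]
    obtain ⟨hy0, hyn, hx0, hxm⟩ := h
    have hyl : y.toNat < g.length := by omega
    apply hrow
    rw [List.getD_eq_getElem?_getD, List.getElem?_eq_getElem hyl]
    exact List.getElem_mem hyl


-- joint invariant of the two BFS loops (queues still present)
structure BInv (land : List (List Int)) (n m cid : Int) (lab0 : List (List Int))
    (stA : List (List Int) × List (Int × Int) × List Int × Int)
    (stB : List (List Int) × List (Int × Int) × Int) : Prop where
  qeq : stA.2.1 = stB.2.1
  qty_eq : stA.2.2.2 = stB.2.2
  qty_pos : 1 ≤ stA.2.2.2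
  dimsA : Dims stA.1 n m
  dimsB : Dims stB.1 n m
  rel : VRel land stA.1 stB.1 n m
  nodup : stA.2.2.1.Nodup
  conniff : ConnIff stB.1 n m cid stA.2.2.1
  ext : LabExt lab0 stB.1 n m cid

-- joint invariant at loop exit (queues dropped)
structure FInv (land : List (List Int)) (n m cid : Int) (lab0 : List (List Int))
    (rA : List (List Int) × List Int × Int) (rB : List (List Int) × Int) : Prop where
  qty_eq : rA.2.2 = rB.2
  qty_pos : 1 ≤ rA.2.2
  dimsA : Dims rA.1 n m
  dimsB : Dims rB.1 n m
  rel : VRel land rA.1 rB.1 n m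
  nodup : rA.2.1.Nodup
  conniff : ConnIff rB.1 n m cid rA.2.1
  ext : LabExt lab0 rB.1 n m cid

lemma one_step (land : List (List Int)) (n m cid : Int) (lab0 : List (List Int))
    (hcid : 0 ≤ cid) (ny nx : Int)
    (g lab : List (List Int)) (q : List (Int × Int)) (conn : List Int) (qty qlen : Int)
    (h : BInv land n m cid lab0 (g, q, conn, qty) (lab, q, qlen)) :
    BInv land n m cid lab0
      (if 0 ≤ ny ∧ ny < n ∧ 0 ≤ nx ∧ nx < m ∧ gGet g ny nx = 1 then
        (gSet g ny nx 0, q ++ [(ny, nx)], (if nx ∈ conn then conn else conn ++ [nx]), qty + 1)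
       else (g, q, conn, qty))
      (if 0 ≤ ny ∧ ny < n ∧ 0 ≤ nx ∧ nx < m ∧ gGet land ny nx = 1 ∧ gGet lab ny nx = -1 then
        (gSet lab ny nx cid, q ++ [(ny, nx)], qlen + 1)
       else (lab, q, qlen)) := by
  have hiff : (0 ≤ ny ∧ ny < n ∧ 0 ≤ nx ∧ nx < m ∧ gGet g ny nx = 1) ↔
      (0 ≤ ny ∧ ny < n ∧ 0 ≤ nx ∧ nx < m ∧ gGet land ny nx = 1 ∧ gGet lab ny nx = -1) := by
    constructor
    · rintro ⟨h1, h2, h3, h4, h5⟩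
      exact ⟨h1, h2, h3, h4, (h.rel ny nx ⟨h1, h2, h3, h4⟩).1 h5⟩
    · rintro ⟨h1, h2, h3, h4, h5⟩
      exact ⟨h1, h2, h3, h4, (h.rel ny nx ⟨h1, h2, h3, h4⟩).2 h5⟩
  by_cases h1 : 0 ≤ ny ∧ ny < n ∧ 0 ≤ nx ∧ nx < m ∧ gGet g ny nx = 1
  · -- both conditions hold
    rw [if_pos h1, if_pos (hiff.mp h1)]
    obtain ⟨hy0, hyn, hx0, hxm, hg1⟩ := h1
    have hin : InR n m ny nx := ⟨hy0, hyn, hx0, hxm⟩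
    have hlabm1 : gGet lab ny nx = -1 := (hiff.mp ⟨hy0, hyn, hx0, hxm, hg1⟩).2.2.2.2.2
    have hqty : qty = qlen := h.qty_eq
    have hqp : (1 : Int) ≤ qty := h.qty_pos
    refine ⟨rfl, show qty + 1 = qlen + 1 by omega,
            show (1 : Int) ≤ qty + 1 by omega,
            dims_gSet _ h.dimsA hin, dims_gSet _ h.dimsB hin, ?_, ?_, ?_, ?_⟩
    · -- VRel
      intro y' x' hin'
      by_cases hc : y' = ny ∧ x' = nx
      · obtain ⟨e1, e2⟩ := hc
        rw [e1, e2, gGet_gSet_self _ h.dimsA hin, gGet_gSet_self _ h.dimsB hin]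
        constructor
        · intro hz; omega
        · rintro ⟨-, hz⟩; omega
      · rw [gGet_gSet_ne _ hy0 hx0 hin'.1 hin'.2.2.1 hc,
            gGet_gSet_ne _ hy0 hx0 hin'.1 hin'.2.2.1 hc]
        exact h.rel y' x' hin'
    · -- Nodup
      show (if nx ∈ conn then conn else conn ++ [nx]).Nodup
      by_cases hmem : nx ∈ conn
      · rw [if_pos hmem]; exact h.nodup
      · have hnd : conn.Nodup := h.nodup
        rw [if_neg hmem, List.nodup_append]
        refine ⟨hnd, List.nodup_singleton _, ?_⟩
        intro a ha b hb
        rw [List.mem_singleton] at hb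
        subst hb
        exact fun he => hmem (he ▸ ha)
    · -- ConnIff
      intro x0
      have hmem' : (x0 ∈ (if nx ∈ conn then conn else conn ++ [nx])) ↔ (x0 ∈ conn ∨ x0 = nx) := by
        by_cases hmem : nx ∈ conn
        · rw [if_pos hmem]
          constructor
          · exact Or.inl
          · rintro (hh | rfl) <;> [exact hh; exact hmem]
        · rw [if_neg hmem]; simp
      rw [hmem']
      constructor
      · rintro (hold | rfl)
        · obtain ⟨y0, hin0, hl0⟩ := (h.conniff x0).1 hold
          refine ⟨y0, hin0, ?_⟩
          have hne : ¬(y0 = ny ∧ x0 = nx) := by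
            rintro ⟨rfl, rfl⟩
            rw [hlabm1] at hl0; omega
          rw [gGet_gSet_ne _ hy0 hx0 hin0.1 hin0.2.2.1 hne]
          exact hl0
        · exact ⟨ny, hin, by rw [gGet_gSet_self _ h.dimsB hin]⟩
      · rintro ⟨y0, hin0, hl0⟩
        by_cases hc : y0 = ny ∧ x0 = nx
        · exact Or.inr hc.2
        · rw [gGet_gSet_ne _ hy0 hx0 hin0.1 hin0.2.2.1 hc] at hl0
          exact Or.inl ((h.conniff x0).2 ⟨y0, hin0, hl0⟩)
    · -- LabExt
      intro y0 x0 hin0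
      by_cases hc : y0 = ny ∧ x0 = nx
      · obtain ⟨e1, e2⟩ := hc
        rw [e1, e2]
        right
        refine ⟨by rw [gGet_gSet_self _ h.dimsB hin], ?_⟩
        rcases h.ext ny nx hin with he | he
        · rw [← he]; exact hlabm1
        · exact he.2
      · rw [gGet_gSet_ne _ hy0 hx0 hin0.1 hin0.2.2.1 hc]
        exact h.ext y0 x0 hin0
  · rw [if_neg h1, if_neg (fun h2 => h1 (hiff.mpr h2))]
    exact h

lemma step_sim (land : List (List Int)) (n m cid : Int) (lab0 : List (List Int))
    (hcid : 0 ≤ cid) (y x : Int) (dirs : List (Int × Int)) :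
    ∀ (stA : List (List Int) × List (Int × Int) × List Int × Int)
      (stB : List (List Int) × List (Int × Int) × Int),
    BInv land n m cid lab0 stA stB →
    BInv land n m cid lab0
      (dirs.foldl (fun st d =>
        match st with
        | (g, q, conn, qty) =>
          let ny := y + d.1
          let nx := x + d.2
          if 0 ≤ ny ∧ ny < n ∧ 0 ≤ nx ∧ nx < m ∧ gGet g ny nx = 1 then
            (gSet g ny nx 0, q ++ [(ny, nx)], (if nx ∈ conn then conn else conn ++ [nx]), qty + 1)
          else (g, q, conn, qty)) stA)
      (dirs.foldl (fun st d =>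
        match st with
        | (lab, todo, qlen) =>
          let ny := y + d.1
          let nx := x + d.2
          if 0 ≤ ny ∧ ny < n ∧ 0 ≤ nx ∧ nx < m ∧ gGet land ny nx = 1 ∧ gGet lab ny nx = -1 then
            (gSet lab ny nx cid, todo ++ [(ny, nx)], qlen + 1)
          else (lab, todo, qlen)) stB) := by
  induction dirs with
  | nil => intro stA stB h; simpa using h
  | cons d rest ih =>
    intro stA stB h
    obtain ⟨g, q, conn, qty⟩ := stA
    obtain ⟨lab, todo, qlen⟩ := stB
    have hq : q = todo := h.qeq
    subst hq
    simp only [List.foldl_cons]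
    exact ih _ _ (one_step land n m cid lab0 hcid (y + d.1) (x + d.2) g lab q conn qty qlen h)

lemma binv_finv (land : List (List Int)) (n m cid : Int) (lab0 : List (List Int))
    (g lab : List (List Int)) (q : List (Int × Int)) (conn : List Int) (qty qlen : Int)
    (h : BInv land n m cid lab0 (g, q, conn, qty) (lab, q, qlen)) :
    FInv land n m cid lab0 (g, conn, qty) (lab, qlen) :=
  ⟨h.qty_eq, h.qty_pos, h.dimsA, h.dimsB, h.rel, h.nodup, h.conniff, h.ext⟩

lemma loop_sim (land : List (List Int)) (n m cid : Int) (lab0 : List (List Int))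
    (hcid : 0 ≤ cid) :
    ∀ (fuel : Nat) (g lab : List (List Int)) (q : List (Int × Int)) (conn : List Int)
      (qty qlen : Int),
      BInv land n m cid lab0 (g, q, conn, qty) (lab, q, qlen) →
      FInv land n m cid lab0 (bfsLoopA n m fuel (g, q, conn, qty))
        (fillLoopB land n m cid fuel (lab, q, qlen)) := by
  intro fuel
  induction fuel with
  | zero =>
    intro g lab q conn qty qlen h
    exact binv_finv land n m cid lab0 g lab q conn qty qlen h
  | succ fuel ih =>
    intro g lab q conn qty qlen h
    cases q with
    | nil =>
      exact binv_finv land n m cid lab0 g lab [] conn qty qlen h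
    | cons hd tl =>
      obtain ⟨y, x⟩ := hd
      show FInv land n m cid lab0
        (bfsLoopA n m fuel (bfsStepA n m y x (g, tl, conn, qty)))
        (fillLoopB land n m cid fuel (fillStepB land n m cid y x (lab, tl, qlen)))
      have htl : BInv land n m cid lab0 (g, tl, conn, qty) (lab, tl, qlen) :=
        ⟨rfl, h.qty_eq, h.qty_pos, h.dimsA, h.dimsB, h.rel, h.nodup, h.conniff, h.ext⟩
      have hstep := step_sim land n m cid lab0 hcid y x pvDirsA
        (g, tl, conn, qty) (lab, tl, qlen) htl
      have hAeq : bfsStepA n m y x (g, tl, conn, qty)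
          = pvDirsA.foldl (fun st d =>
              match st with
              | (g, q, conn, qty) =>
                let ny := y + d.1
                let nx := x + d.2
                if 0 ≤ ny ∧ ny < n ∧ 0 ≤ nx ∧ nx < m ∧ gGet g ny nx = 1 then
                  (gSet g ny nx 0, q ++ [(ny, nx)], (if nx ∈ conn then conn else conn ++ [nx]), qty + 1)
                else (g, q, conn, qty)) (g, tl, conn, qty) := rfl
      have hBeq : fillStepB land n m cid y x (lab, tl, qlen)
          = pvDirsA.foldl (fun st d =>
              match st with
              | (lab, todo, qlen) =>
                let ny := y + d.1
                let nx := x + d.2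
                if 0 ≤ ny ∧ ny < n ∧ 0 ≤ nx ∧ nx < m ∧ gGet land ny nx = 1 ∧ gGet lab ny nx = -1 then
                  (gSet lab ny nx cid, todo ++ [(ny, nx)], qlen + 1)
                else (lab, todo, qlen)) (lab, tl, qlen) := rfl
      rw [← hAeq, ← hBeq] at hstep
      rcases hA' : bfsStepA n m y x (g, tl, conn, qty) with ⟨g', q', conn', qty'⟩
      rcases hB' : fillStepB land n m cid y x (lab, tl, qlen) with ⟨lab', q2, qlen'⟩
      rw [hA', hB'] at hstep
      have hqq : q' = q2 := hstep.qeq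
      subst hqq
      exact ih g' lab' q' conn' qty' qlen' hstep

-- (L1)-- (L1) the pipe-update fold, column by column
lemma pipe_fold (m qty : Int) :
    ∀ (conn : List Int) (pipe : List (List Int)), conn.Nodup →
      (∀ c ∈ conn, 0 ≤ c ∧ c < m) → pipe.length = m.toNat →
      (conn.foldl (fun p c => p.set c.toNat ((p.getD c.toNat []) ++ [qty])) pipe).length = m.toNat ∧
      ∀ x, 0 ≤ x → x < m →
        (conn.foldl (fun p c => p.set c.toNat ((p.getD c.toNat []) ++ [qty])) pipe).getD x.toNat []
          = pipe.getD x.toNat [] ++ (if x ∈ conn then [qty] else []) := by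
  intro conn
  induction conn with
  | nil => intro pipe _ _ hlen; simp [hlen]
  | cons c rest ih =>
    intro pipe hnd hbd hlen
    have hc := hbd c (List.mem_cons_self ..)
    have hcl : c.toNat < pipe.length := by omega
    have hnd' : rest.Nodup := (List.nodup_cons.mp hnd).2
    have hcr : c ∉ rest := (List.nodup_cons.mp hnd).1
    set pipe1 := pipe.set c.toNat ((pipe.getD c.toNat []) ++ [qty]) with hp1
    have hlen1 : pipe1.length = m.toNat := by rw [hp1, List.length_set]; exact hlen
    obtain ⟨ihl, ihg⟩ := ih pipe1 hnd' (fun d hd => hbd d (List.mem_cons_of_mem _ hd)) hlen1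
    refine ⟨by simpa using ihl, ?_⟩
    intro x hx0 hxm
    rw [List.foldl_cons, ← hp1, ihg x hx0 hxm]
    by_cases hxc : x = c
    · subst hxc
      have h1 : pipe1.getD x.toNat [] = pipe.getD x.toNat [] ++ [qty] := by
        rw [hp1, List.getD_eq_getElem?_getD, List.getElem?_set, if_pos rfl, if_pos hcl,
            List.getD_eq_getElem?_getD]
        simp [List.getElem?_eq_getElem hcl]
      rw [h1, if_neg hcr, if_pos (List.mem_cons_self ..)]
      simp
    · have hnee : c.toNat ≠ x.toNat := by omega
      have h1 : pipe1.getD x.toNat [] = pipe.getD x.toNat [] := by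
        rw [hp1, List.getD_eq_getElem?_getD, List.getElem?_set, if_neg hnee,
            ← List.getD_eq_getElem?_getD]
      rw [h1]
      have : (x ∈ c :: rest) ↔ (x ∈ rest) := by
        simp [List.mem_cons, hxc]
      by_cases hxr : x ∈ rest
      · rw [if_pos hxr, if_pos (this.mpr hxr)]
      · rw [if_neg hxr, if_neg (fun hh => hxr (this.mp hh))]

-- (L2) inner form of the column-scan shift
def scanStep (lab : List (List Int)) (sizes : PySem.Dict Int Int) (x : Int)
    (st : List Int × Int) (y : Int) : List Int × Int :=
  let c := gGet lab y x
  if c ≠ -1 ∧ c ∉ st.1 then (PySem.Set.add st.1 c, st.2 + sizes.getD c 0) else st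

lemma colScanB_eq_scanStep (lab : List (List Int)) (sizes : PySem.Dict Int Int) (n x : Int) :
    colScanB lab sizes n x
      = ((PySem.List.pyRange 0 n 1).foldl (scanStep lab sizes x)
          ((PySem.Set.empty : PySem.Set Int), (0 : Int))).2 := rfl

lemma scan_shift (lab lab' : List (List Int)) (n m cid qty : Int)
    (sizes : PySem.Dict Int Int) (x : Int)
    (hcid : 0 ≤ cid) (hext : LabExt lab lab' n m cid)
    (hfresh : ∀ y x, InR n m y x → gGet lab y x < cid)
    (hx0 : 0 ≤ x) (hxm : x < m) :
    ∀ (ys : List Int), (∀ y ∈ ys, 0 ≤ y ∧ y < n) →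
      ∀ (seenA seenB : List Int) (tA : Int) (hit : Bool),
        (∀ c, c ∈ seenB ↔ (c ∈ seenA ∨ (hit = true ∧ c = cid))) → cid ∉ seenA →
        (ys.foldl (scanStep lab' (sizes.insert cid qty) x)
            (seenB, tA + (if hit = true then qty else 0))).2
        = (ys.foldl (scanStep lab sizes x) (seenA, tA)).2
          + (if (hit = true) ∨ ∃ y ∈ ys, gGet lab' y x = cid then qty else 0) := by
  intro ys
  induction ys with
  | nil =>
    intro _ seenA seenB tA hit hseen hcidA
    simp
  | cons y ys ih =>
    intro hbd seenA seenB tA hit hseen hcidA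
    have hbd' : ∀ z ∈ ys, 0 ≤ z ∧ z < n := fun z hz => hbd z (List.mem_cons_of_mem _ hz)
    have hy := hbd y (List.mem_cons_self ..)
    have hin : InR n m y x := ⟨hy.1, hy.2, hx0, hxm⟩
    have hylt := hfresh y x hin
    simp only [List.foldl_cons]
    rcases hext y x hin with hcc | ⟨hcid', hm1⟩
    · -- this cell keeps its old label
      by_cases hc1 : gGet lab y x = -1
      · have hA : scanStep lab sizes x (seenA, tA) y = (seenA, tA) := by
          simp [scanStep, hc1]
        have hB : scanStep lab' (sizes.insert cid qty) x
            (seenB, tA + (if hit = true then qty else 0)) y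
            = (seenB, tA + (if hit = true then qty else 0)) := by
          simp [scanStep, hcc, hc1]
        rw [hA, hB, ih hbd' seenA seenB tA hit hseen hcidA]
        have hne : ¬ (gGet lab' y x = cid) := by rw [hcc, hc1]; omega
        congr 1
        simp only [List.exists_mem_cons_iff, hne, false_or]
      · have hnec : gGet lab y x ≠ cid := by omega
        have hne : ¬ (gGet lab' y x = cid) := by rw [hcc]; exact hnec
        have hmemiff : gGet lab y x ∈ seenB ↔ gGet lab y x ∈ seenA := by
          rw [hseen]
          simp [hnec]
        by_cases hcs : gGet lab y x ∈ seenA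
        · have hA : scanStep lab sizes x (seenA, tA) y = (seenA, tA) := by
            simp [scanStep, hcs]
          have hB : scanStep lab' (sizes.insert cid qty) x
              (seenB, tA + (if hit = true then qty else 0)) y
              = (seenB, tA + (if hit = true then qty else 0)) := by
            simp [scanStep, hcc, hmemiff.mpr hcs]
          rw [hA, hB, ih hbd' seenA seenB tA hit hseen hcidA]
          congr 1
          simp only [List.exists_mem_cons_iff, hne, false_or]
        · have hA : scanStep lab sizes x (seenA, tA) y
              = (PySem.Set.add seenA (gGet lab y x), tA + sizes.getD (gGet lab y x) 0) := by
            simp [scanStep, hc1, hcs]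
          have hB : scanStep lab' (sizes.insert cid qty) x
              (seenB, tA + (if hit = true then qty else 0)) y
              = (PySem.Set.add seenB (gGet lab y x),
                 (tA + sizes.getD (gGet lab y x) 0) + (if hit = true then qty else 0)) := by
            simp only [scanStep, hcc]
            rw [if_pos ⟨hc1, fun hh => hcs (hmemiff.mp hh)⟩]
            rw [PySem.Dict.getD_insert_of_ne sizes qty 0 hnec]
            simp only [Prod.mk.injEq]
            exact ⟨by trivial, by ring⟩
          rw [hA, hB,
            ih hbd' (PySem.Set.add seenA (gGet lab y x)) (PySem.Set.add seenB (gGet lab y x))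
              (tA + sizes.getD (gGet lab y x) 0) hit
              (by
                intro c0
                rw [PySem.Set.mem_add, PySem.Set.mem_add, hseen]
                tauto)
              (by
                rw [PySem.Set.mem_add]
                rintro (hh | hh)
                exacts [hcidA hh, hnec hh.symm])]
          congr 1
          simp only [List.exists_mem_cons_iff, hne, false_or]
    · -- this cell was newly labelled cid
      have hcne : ¬ (cid = (-1 : Int)) := by omega
      have hA : scanStep lab sizes x (seenA, tA) y = (seenA, tA) := by
        simp [scanStep, hm1]
      rw [hA]
      by_cases hhit : hit = true
      · have hmemB : cid ∈ seenB := (hseen cid).2 (Or.inr ⟨hhit, rfl⟩)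
        have hB : scanStep lab' (sizes.insert cid qty) x
            (seenB, tA + (if hit = true then qty else 0)) y
            = (seenB, tA + (if hit = true then qty else 0)) := by
          simp [scanStep, hcid', hmemB]
        rw [hB, ih hbd' seenA seenB tA hit hseen hcidA]
        congr 1
        simp [hhit]
      · have hmemB : cid ∉ seenB := by
          rw [hseen]
          rintro (hh | ⟨hh, -⟩)
          exacts [hcidA hh, hhit hh]
        have hB : scanStep lab' (sizes.insert cid qty) x
            (seenB, tA + (if hit = true then qty else 0)) y
            = (PySem.Set.add seenB cid, tA + (if (true : Bool) = true then qty else 0)) := by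
          simp only [scanStep, hcid']
          rw [if_pos ⟨hcne, hmemB⟩]
          rw [PySem.Dict.getD_insert_self sizes cid qty 0]
          simp only [Prod.mk.injEq]
          refine ⟨by trivial, ?_⟩
          simp [hhit]
        rw [hB,
          ih hbd' seenA (PySem.Set.add seenB cid) tA true
            (by
              intro c0
              rw [PySem.Set.mem_add, hseen]
              simp only [hhit]
              tauto)
            hcidA]
        have h1 : ((true : Bool) = true ∨ ∃ z ∈ ys, gGet lab' z x = cid) := Or.inl rfl
        rw [if_pos h1,
          if_pos (show (hit = true) ∨ ∃ z ∈ y :: ys, gGet lab' z x = cid from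
            Or.inr ⟨y, List.mem_cons_self .., hcid'⟩)]

-- the outer joint invariant
structure OInv (land : List (List Int)) (n m : Int)
    (stA : List (List Int) × List (List Int))
    (stB : List (List Int) × PySem.Dict Int Int × Int) : Prop where
  dimsA : Dims stA.1 n m
  dimsB : Dims stB.1 n m
  rel : VRel land stA.1 stB.1 n m
  cid0 : 0 ≤ stB.2.2
  fresh : ∀ y x, InR n m y x → gGet stB.1 y x < stB.2.2
  plen : stA.2.length = m.toNat
  psum : ∀ x, 0 ≤ x → x < m →
    ((stA.2.getD x.toNat []).sum = colScanB stB.1 stB.2.1 n x ∧ 0 ≤ (stA.2.getD x.toNat []).sum)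

lemma comp_sim (land : List (List Int)) (n m i j : Int)
    (stA : List (List Int) × List (List Int))
    (stB : List (List Int) × PySem.Dict Int Int × Int)
    (hin : InR n m i j) (h : OInv land n m stA stB)
    (hbr : gGet stA.1 i j = 1) :
    OInv land n m
      (match bfsA n m stA.1 i j with
       | (g', conn, qty) =>
         (g', conn.foldl (fun p c => p.set c.toNat ((p.getD c.toNat []) ++ [qty])) stA.2))
      (match fillLoopB land n m stB.2.2 (n.toNat * m.toNat + 1)
              (gSet stB.1 i j stB.2.2, [(i, j)], 1) with
       | (lab', qlen) => (lab', stB.2.1.insert stB.2.2 qlen, stB.2.2 + 1)) := by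
  obtain ⟨g, pipe⟩ := stA
  obtain ⟨lab, sizes, cid⟩ := stB
  simp only at hbr ⊢
  have hcid : (0 : Int) ≤ cid := h.cid0
  have hdA0 : Dims g n m := h.dimsA
  have hdB0 : Dims lab n m := h.dimsB
  have hrel0 : VRel land g lab n m := h.rel
  have hfresh0 : ∀ y x, InR n m y x → gGet lab y x < cid := h.fresh
  have hplen0 : pipe.length = m.toNat := h.plen
  have hpsum0 : ∀ x, 0 ≤ x → x < m →
      ((pipe.getD x.toNat []).sum = colScanB lab sizes n x ∧ 0 ≤ (pipe.getD x.toNat []).sum) :=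
    h.psum
  have hland : gGet land i j = 1 ∧ gGet lab i j = -1 := (hrel0 i j hin).1 hbr
  -- the initial joint BFS invariant
  have hinit : BInv land n m cid lab
      (gSet g i j 0, [(i, j)], [j], 1) (gSet lab i j cid, [(i, j)], 1) := by
    refine ⟨rfl, rfl, le_refl _, dims_gSet _ hdA0 hin, dims_gSet _ hdB0 hin, ?_, ?_, ?_, ?_⟩
    · intro y' x' hin'
      by_cases hc : y' = i ∧ x' = j
      · obtain ⟨e1, e2⟩ := hc
        rw [e1, e2, gGet_gSet_self _ hdA0 hin, gGet_gSet_self _ hdB0 hin]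
        constructor
        · intro hz; omega
        · rintro ⟨-, hz⟩; omega
      · rw [gGet_gSet_ne _ hin.1 hin.2.2.1 hin'.1 hin'.2.2.1 hc,
            gGet_gSet_ne _ hin.1 hin.2.2.1 hin'.1 hin'.2.2.1 hc]
        exact hrel0 y' x' hin'
    · exact List.nodup_singleton _
    · intro x0
      constructor
      · intro hx0
        rw [List.mem_singleton] at hx0
        subst hx0
        exact ⟨i, hin, by rw [gGet_gSet_self _ hdB0 hin]⟩
      · rintro ⟨y0, hin0, hl0⟩
        by_cases hc : y0 = i ∧ x0 = j
        · rw [hc.2]; exact List.mem_singleton.mpr rfl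
        · rw [gGet_gSet_ne _ hin.1 hin.2.2.1 hin0.1 hin0.2.2.1 hc] at hl0
          have := hfresh0 y0 x0 hin0
          omega
    · intro y0 x0 hin0
      by_cases hc : y0 = i ∧ x0 = j
      · obtain ⟨e1, e2⟩ := hc
        rw [e1, e2]
        exact Or.inr ⟨by rw [gGet_gSet_self _ hdB0 hin], hland.2⟩
      · rw [gGet_gSet_ne _ hin.1 hin.2.2.1 hin0.1 hin0.2.2.1 hc]
        exact Or.inl rfl
  have hfin := loop_sim land n m cid lab hcid (n.toNat * m.toNat + 1)
    (gSet g i j 0) (gSet lab i j cid) [(i, j)] [j] 1 1 hinit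
  rcases hA : bfsA n m g i j with ⟨g', conn, qty⟩
  rcases hB : fillLoopB land n m cid (n.toNat * m.toNat + 1) (gSet lab i j cid, [(i, j)], 1)
    with ⟨lab', qlen⟩
  rw [show bfsA n m g i j = bfsLoopA n m (n.toNat * m.toNat + 1) (gSet g i j 0, [(i, j)], [j], 1)
      from rfl] at hA
  rw [hA, hB] at hfin
  simp only
  have hqty : qty = qlen := hfin.qty_eq
  subst hqty
  have hqp : (1 : Int) ≤ qty := hfin.qty_pos
  have hdA : Dims g' n m := hfin.dimsA
  have hdB : Dims lab' n m := hfin.dimsB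
  have hrel : VRel land g' lab' n m := hfin.rel
  have hnd : conn.Nodup := hfin.nodup
  have hcf : ConnIff lab' n m cid conn := hfin.conniff
  have hext : LabExt lab lab' n m cid := hfin.ext
  have hconnbd : ∀ c ∈ conn, 0 ≤ c ∧ c < m := by
    intro c hcc
    obtain ⟨y0, hin0, -⟩ := (hcf c).1 hcc
    exact ⟨hin0.2.2.1, hin0.2.2.2⟩
  obtain ⟨hplen, hpget⟩ := pipe_fold m qty conn pipe hnd hconnbd hplen0
  refine ⟨hdA, hdB, hrel, show (0 : Int) ≤ cid + 1 by omega, ?_, hplen, ?_⟩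
  · -- freshness for cid + 1
    intro y0 x0 hin0
    show gGet lab' y0 x0 < cid + 1
    rcases hext y0 x0 hin0 with he | he
    · have := hfresh0 y0 x0 hin0
      omega
    · omega
  · -- column sums
    intro x hx0 hxm
    show ((conn.foldl (fun p c => p.set c.toNat ((p.getD c.toNat []) ++ [qty])) pipe).getD
        x.toNat []).sum = colScanB lab' (sizes.insert cid qty) n x ∧ _
    obtain ⟨hold, holdnn⟩ := hpsum0 x hx0 hxm
    have hshift := scan_shift lab lab' n m cid qty sizes x hcid hext hfresh0 hx0 hxm
      (PySem.List.pyRange 0 n 1)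
      (fun y hy => by
        have := (PySem.List.mem_pyRange_one).mp hy
        exact ⟨this.1, this.2⟩)
      [] [] 0 false (by simp) (by simp)
    have hscan' : colScanB lab' (sizes.insert cid qty) n x
        = colScanB lab sizes n x + (if x ∈ conn then qty else 0) := by
      rw [colScanB_eq_scanStep, colScanB_eq_scanStep]
      have hiff2 : ((false = true) ∨ ∃ y ∈ PySem.List.pyRange 0 n 1, gGet lab' y x = cid)
          ↔ x ∈ conn := by
        constructor
        · rintro (hh | ⟨y0, hy0, hl0⟩)
          · exact absurd hh (by simp)
          · have := (PySem.List.mem_pyRange_one).mp hy0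
            exact (hcf x).2 ⟨y0, ⟨this.1, this.2, hx0, hxm⟩, hl0⟩
        · intro hh
          obtain ⟨y0, hin0, hl0⟩ := (hcf x).1 hh
          exact Or.inr ⟨y0, (PySem.List.mem_pyRange_one).mpr ⟨hin0.1, hin0.2.1⟩, hl0⟩
      rw [show ((PySem.Set.empty : PySem.Set Int), (0 : Int))
            = (([] : List Int), (0 : Int) + (if false = true then qty else 0)) by
          simp [PySem.Set.empty],
          hshift]
      rw [if_congr hiff2 rfl rfl]
      simp
    rw [hpget x hx0 hxm, hscan', List.sum_append, hold]
    have hc0 : 0 ≤ colScanB lab sizes n x := hold ▸ holdnn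
    constructor
    · congr 1
      by_cases hxc : x ∈ conn
      · rw [if_pos hxc, if_pos hxc]; simp
      · rw [if_neg hxc, if_neg hxc]; simp
    · by_cases hxc : x ∈ conn
      · rw [if_pos hxc]
        simp only [List.sum_cons, List.sum_nil]
        omega
      · rw [if_neg hxc]
        simpa using hc0

lemma cell_sim (land : List (List Int)) (n m i j : Int)
    (stA : List (List Int) × List (List Int))
    (stB : List (List Int) × PySem.Dict Int Int × Int)
    (hin : InR n m i j) (h : OInv land n m stA stB) :
    OInv land n m
      (if gGet stA.1 i j = 1 then
        match bfsA n m stA.1 i j with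
        | (g', conn, qty) =>
          (g', conn.foldl (fun p c => p.set c.toNat ((p.getD c.toNat []) ++ [qty])) stA.2)
       else stA)
      (match stB with
       | (lab, sizes, cid) =>
         if gGet land i j = 1 ∧ gGet lab i j = -1 then
           match fillLoopB land n m cid (n.toNat * m.toNat + 1) (gSet lab i j cid, [(i, j)], 1) with
           | (lab', qlen) => (lab', sizes.insert cid qlen, cid + 1)
         else (lab, sizes, cid)) := by
  obtain ⟨g, pipe⟩ := stA
  obtain ⟨lab, sizes, cid⟩ := stB
  have hrel0 : VRel land g lab n m := h.rel
  by_cases hbr : gGet g i j = 1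
  · have hB : gGet land i j = 1 ∧ gGet lab i j = -1 := (hrel0 i j hin).1 hbr
    simp only
    rw [if_pos hbr, if_pos hB]
    exact comp_sim land n m i j (g, pipe) (lab, sizes, cid) hin h hbr
  · have hB : ¬(gGet land i j = 1 ∧ gGet lab i j = -1) := fun hc => hbr ((hrel0 i j hin).2 hc)
    simp only
    rw [if_neg hbr, if_neg hB]
    exact h

lemma row_sim (land : List (List Int)) (n m i : Int) (hi : 0 ≤ i ∧ i < n) :
    ∀ (js : List Int), (∀ j ∈ js, 0 ≤ j ∧ j < m) →
    ∀ stA stB, OInv land n m stA stB →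
    OInv land n m
      (js.foldl (fun st j =>
        if gGet st.1 i j = 1 then
          match bfsA n m st.1 i j with
          | (g', conn, qty) =>
            (g', conn.foldl (fun p c => p.set c.toNat ((p.getD c.toNat []) ++ [qty])) st.2)
        else st) stA)
      (js.foldl (fun st j =>
        match st with
        | (lab, sizes, cid) =>
          if gGet land i j = 1 ∧ gGet lab i j = -1 then
            match fillLoopB land n m cid (n.toNat * m.toNat + 1) (gSet lab i j cid, [(i, j)], 1) with
            | (lab', qlen) => (lab', sizes.insert cid qlen, cid + 1)
          else (lab, sizes, cid)) stB) := by
  intro js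
  induction js with
  | nil => intro _ stA stB h; exact h
  | cons j js ih =>
    intro hbd stA stB h
    have hj := hbd j (List.mem_cons_self ..)
    simp only [List.foldl_cons]
    exact ih (fun z hz => hbd z (List.mem_cons_of_mem _ hz)) _ _
      (cell_sim land n m i j stA stB ⟨hi.1, hi.2, hj.1, hj.2⟩ h)

lemma outer_sim (land : List (List Int)) (n m : Int) :
    ∀ (is : List Int), (∀ i ∈ is, 0 ≤ i ∧ i < n) →
    ∀ (js : List Int), (∀ j ∈ js, 0 ≤ j ∧ j < m) →
    ∀ stA stB, OInv land n m stA stB →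
    OInv land n m
      (is.foldl (fun st i => js.foldl (fun st j =>
        if gGet st.1 i j = 1 then
          match bfsA n m st.1 i j with
          | (g', conn, qty) =>
            (g', conn.foldl (fun p c => p.set c.toNat ((p.getD c.toNat []) ++ [qty])) st.2)
        else st) st) stA)
      (is.foldl (fun st i => js.foldl (fun st j =>
        match st with
        | (lab, sizes, cid) =>
          if gGet land i j = 1 ∧ gGet lab i j = -1 then
            match fillLoopB land n m cid (n.toNat * m.toNat + 1) (gSet lab i j cid, [(i, j)], 1) with
            | (lab', qlen) => (lab', sizes.insert cid qlen, cid + 1)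
          else (lab, sizes, cid)) st) stB) := by
  intro is
  induction is with
  | nil => intro _ js _ stA stB h; exact h
  | cons i is ih =>
    intro hbd js hjs stA stB h
    have hi := hbd i (List.mem_cons_self ..)
    simp only [List.foldl_cons]
    exact ih (fun z hz => hbd z (List.mem_cons_of_mem _ hz)) js hjs _ _
      (row_sim land n m i hi js hjs stA stB h)

lemma foldl_max_le (f : Int → Int) (S : Int) :
    ∀ (xs : List Int) (init : Int), init ≤ S → (∀ x ∈ xs, f x ≤ S) →
      xs.foldl (fun b x => max b (f x)) init ≤ S := by
  intro xs
  induction xs with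
  | nil => intro init h _; exact h
  | cons x xs ih =>
    intro init h hall
    simp only [List.foldl_cons]
    exact ih _ (max_le h (hall x (List.mem_cons_self ..)))
      (fun z hz => hall z (List.mem_cons_of_mem _ hz))

lemma scan_all_neg_one (lab : List (List Int)) (sizes : PySem.Dict Int Int) (x : Int) :
    ∀ (ys : List Int), (∀ y ∈ ys, gGet lab y x = -1) →
    ∀ (st : List Int × Int), ys.foldl (scanStep lab sizes x) st = st := by
  intro ys
  induction ys with
  | nil => intro _ st; rfl
  | cons y ys ih =>
    intro hall st
    simp only [List.foldl_cons]
    rw [show scanStep lab sizes x st y = st by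
      simp [scanStep, hall y (List.mem_cons_self ..)]]
    exact ih (fun z hz => hall z (List.mem_cons_of_mem _ hz)) st

lemma gGet_replicate (a b : Nat) (v : Int) (y x : Int)
    (hy : y.toNat < a) (hx : x.toNat < b) :
    gGet (List.replicate a (List.replicate b v)) y x = v := by
  simp [gGet, List.getD_eq_getElem?_getD, hy, hx]

-- ===== VERDICT (by name: the statement is the Claim_ definition above) =====
theorem solution_spec : Claim_equal_solution := by
  intro land _ hpre
  obtain ⟨hne, hm0, hrows⟩ := hpre
  show solution land = solution_alt land
  have hA : solution land
      = (match PySem.List.max?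
            (outerA (land.length : Int) ((land.headD []).length : Int)
              (land, List.replicate ((land.headD []).length : Int).toNat [])).2
            (fun l => l.sum) with
         | some l => l.sum
         | none => 0) := rfl
  have hB : solution_alt land
      = (PySem.List.pyRange 0 ((land.headD []).length : Int) 1).foldl
          (fun best x => max best
            (colScanB (labelB land (land.length : Int) ((land.headD []).length : Int)).1
              (labelB land (land.length : Int) ((land.headD []).length : Int)).2.1
              (land.length : Int) x)) 0 := rfl
  rw [hA, hB]
  set n : Int := (land.length : Int) with hn
  set m : Int := ((land.headD []).length : Int) with hm
  have hnN : n.toNat = land.length := by omega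
  have hmN : m.toNat = (land.headD []).length := by omega
  have hmpos : 1 ≤ m.toNat := by
    have : (land.headD []).length ≠ 0 := hm0
    omega
  -- the initial outer invariant
  have hinit : OInv land n m (land, List.replicate m.toNat [])
      (List.replicate n.toNat (List.replicate m.toNat (-1)), PySem.Dict.empty, 0) := by
    have hlab0 : ∀ y x, InR n m y x →
        gGet (List.replicate n.toNat (List.replicate m.toNat (-1 : Int))) y x = -1 := by
      intro y x hin
      obtain ⟨h1, h2, h3, h4⟩ := hin
      exact gGet_replicate _ _ _ y x (by omega) (by omega)
    refine ⟨⟨show land.length = n.toNat by omega,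
              fun row hr => show row.length = m.toNat by rw [hrows row hr]; omega⟩,
            ⟨by simp, ?_⟩, ?_, show (0 : Int) ≤ 0 from le_refl _, ?_,
            show (List.replicate m.toNat ([] : List Int)).length = m.toNat by simp, ?_⟩
    · intro row hr
      rw [List.eq_of_mem_replicate hr]
      simp
    · intro y x hin
      show gGet land y x = 1 ↔ gGet land y x = 1 ∧ _
      rw [hlab0 y x hin]
      simp
    · intro y x hin
      show gGet (List.replicate n.toNat (List.replicate m.toNat (-1 : Int))) y x < (0 : Int)
      rw [hlab0 y x hin]
      omega
    · intro x hx0 hxm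
      show ((List.replicate m.toNat ([] : List Int)).getD x.toNat []).sum
          = colScanB (List.replicate n.toNat (List.replicate m.toNat (-1 : Int)))
              PySem.Dict.empty n x ∧ _
      have hcol : colScanB (List.replicate n.toNat (List.replicate m.toNat (-1 : Int)))
          PySem.Dict.empty n x = 0 := by
        rw [colScanB_eq_scanStep]
        rw [scan_all_neg_one _ _ x (PySem.List.pyRange 0 n 1)
          (fun y hy => by
            have := (PySem.List.mem_pyRange_one).mp hy
            exact hlab0 y x ⟨this.1, this.2, hx0, hxm⟩) _]
      constructor
      · rw [hcol]
        have : x.toNat < m.toNat := by omega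
        simp [List.getD_eq_getElem?_getD, this]
      · have : x.toNat < m.toNat := by omega
        simp [List.getD_eq_getElem?_getD, this]
  have hfinal := outer_sim land n m (PySem.List.pyRange 0 n 1)
    (fun i hi => by
      have := (PySem.List.mem_pyRange_one).mp hi
      exact ⟨this.1, this.2⟩)
    (PySem.List.pyRange 0 m 1)
    (fun j hj => by
      have := (PySem.List.mem_pyRange_one).mp hj
      exact ⟨this.1, this.2⟩)
    (land, List.replicate m.toNat [])
    (List.replicate n.toNat (List.replicate m.toNat (-1)), PySem.Dict.empty, 0)
    hinit
  have hOA : outerA n m (land, List.replicate m.toNat [])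
      = (PySem.List.pyRange 0 n 1).foldl (fun st i => (PySem.List.pyRange 0 m 1).foldl (fun st j =>
          if gGet st.1 i j = 1 then
            match bfsA n m st.1 i j with
            | (g', conn, qty) =>
              (g', conn.foldl (fun p c => p.set c.toNat ((p.getD c.toNat []) ++ [qty])) st.2)
          else st) st) (land, List.replicate m.toNat []) := rfl
  have hOB : labelB land n m
      = (PySem.List.pyRange 0 n 1).foldl (fun st i => (PySem.List.pyRange 0 m 1).foldl (fun st j =>
          match st with
          | (lab, sizes, cid) =>
            if gGet land i j = 1 ∧ gGet lab i j = -1 then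
              match fillLoopB land n m cid (n.toNat * m.toNat + 1)
                  (gSet lab i j cid, [(i, j)], 1) with
              | (lab', qlen) => (lab', sizes.insert cid qlen, cid + 1)
            else (lab, sizes, cid)) st)
        (List.replicate n.toNat (List.replicate m.toNat (-1)), PySem.Dict.empty, 0) := rfl
  rw [← hOA, ← hOB] at hfinal
  rcases hres : outerA n m (land, List.replicate m.toNat []) with ⟨gF, pipeF⟩
  rcases hresB : labelB land n m with ⟨labF, sizesF, cidF⟩
  rw [hres, hresB] at hfinal
  have hplen : pipeF.length = m.toNat := hfinal.plen
  have hpsum : ∀ x, 0 ≤ x → x < m →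
      ((pipeF.getD x.toNat []).sum = colScanB labF sizesF n x ∧ 0 ≤ (pipeF.getD x.toNat []).sum) := by
    intro x hx0 hxm
    exact hfinal.psum x hx0 hxm

  -- A's answer: the maximal column sum
  have hpne : pipeF ≠ [] := by
    intro hh
    rw [hh] at hplen
    simp at hplen
    omega
  rcases hmax : PySem.List.max? pipeF (fun l => l.sum) with - | mx
  · rw [PySem.List.max?_eq_none_iff] at hmax
    exact absurd hmax hpne
  · have hmem : mx ∈ pipeF := PySem.List.max?_mem hmax
    have hismax : ∀ y ∈ pipeF, y.sum ≤ mx.sum := PySem.List.max?_isMax hmax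
    obtain ⟨k, hk, hkeq⟩ := List.getElem_of_mem hmem
    have hx0r : 0 ≤ ((k : Nat) : Int) ∧ ((k : Nat) : Int) < m := by
      constructor
      · omega
      · have : k < m.toNat := by omega
        omega
    have hgetk : pipeF.getD (((k : Nat) : Int)).toNat [] = mx := by
      rw [Int.toNat_natCast, List.getD_eq_getElem?_getD, List.getElem?_eq_getElem hk, hkeq]
      rfl
    obtain ⟨hck, hcknn⟩ := hpsum ((k : Nat) : Int) hx0r.1 hx0r.2
    rw [hgetk] at hck hcknn
    have hub : ∀ x ∈ PySem.List.pyRange 0 m 1,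
        colScanB labF sizesF n x ≤ mx.sum := by
      intro x hx
      have hxb := (PySem.List.mem_pyRange_one).mp hx
      obtain ⟨hcx, -⟩ := hpsum x hxb.1 hxb.2
      rw [← hcx]
      apply hismax
      have hxl : x.toNat < pipeF.length := by omega
      rw [List.getD_eq_getElem?_getD, List.getElem?_eq_getElem hxl]
      exact List.getElem_mem hxl
    have hle : (PySem.List.pyRange 0 m 1).foldl
        (fun best x => max best (colScanB labF sizesF n x)) 0 ≤ mx.sum :=
      foldl_max_le _ _ _ 0 (by omega) hub
    have hge : mx.sum ≤ (PySem.List.pyRange 0 m 1).foldl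
        (fun best x => max best (colScanB labF sizesF n x)) 0 := by
      have hmemx : ((k : Nat) : Int) ∈ PySem.List.pyRange 0 m 1 :=
        (PySem.List.mem_pyRange_one).mpr ⟨hx0r.1, hx0r.2⟩
      have := (PySem.List.le_foldl_max_int (PySem.List.pyRange 0 m 1)
        (fun x => colScanB labF sizesF n x) 0).2 _ hmemx
      rw [hck]
      exact this
    simp only
    omega
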